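-- pv_equiv track=rewrite | github.com/GIS-DHSIT/DocWain | src/orchestrator/answer.py | _detect_exact_match
-- ===== SOURCE A (Python) =====
-- from typing import Any, Dict, List, Optional, Tuple
--
-- def _detect_exact_match(query: str, chunks: List[Dict[str, Any]]) -> bool:
--     query_terms = [term for term in (query or "").lower().split() if len(term) > 2]
--     if not query_terms:
--         return False
--     for chunk in chunks:
--         text = (chunk.get("text") or "").lower()
--         if any(term in text for term in query_terms):
--             return True
--     return False
-- ===== SOURCE B (Python) =====
-- def _detect_exact_match(query, chunks):
--     # Window matcher: group terms by length into hash sets, scan each text once,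
--     # testing the fixed-length window at every position for set membership.
--     terms = [t for t in (query or "").lower().split() if len(t) > 2]
--     if not terms:
--         return False
--     by_len = {}
--     for t in terms:
--         by_len.setdefault(len(t), set()).add(t)
--     for chunk in chunks:
--         text = (chunk.get("text") or "").lower()
--         for i in range(len(text)):
--             for length, termset in by_len.items():
--                 if text[i:i + length] in termset:
--                     return True
--     return False
-- ===== Notes on version B (the rewrite author's own statement) =====
-- stated objective: alternative
-- what changed: B replaces A's per-term substring search ('term in text' for each term) with a multi-pattern window matcher: it groups the terms by length into hash sets once, then scans each lowered text a single position at a time, testing the fixed-length window slice at that position for set membership.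
import Mathlib
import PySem

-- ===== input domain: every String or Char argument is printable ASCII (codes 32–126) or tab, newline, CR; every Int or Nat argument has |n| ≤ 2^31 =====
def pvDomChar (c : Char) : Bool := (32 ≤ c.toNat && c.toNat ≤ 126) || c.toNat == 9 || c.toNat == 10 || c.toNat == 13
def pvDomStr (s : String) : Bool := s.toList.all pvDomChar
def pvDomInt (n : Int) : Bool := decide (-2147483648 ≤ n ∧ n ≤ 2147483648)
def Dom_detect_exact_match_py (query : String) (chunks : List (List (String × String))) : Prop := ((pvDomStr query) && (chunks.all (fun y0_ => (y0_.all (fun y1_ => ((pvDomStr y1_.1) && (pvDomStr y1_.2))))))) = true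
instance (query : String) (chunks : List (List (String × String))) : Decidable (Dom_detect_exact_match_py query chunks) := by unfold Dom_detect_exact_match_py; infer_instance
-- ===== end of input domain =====

-- B replaces A's per-term substring search with a length-grouped hash-set window scan; return value proved equal.

-- ===== PORT A =====
-- A: chunk-outer loop; for each chunk lower its text and test each query term with 'term in text'; early return on a hit.
def pvALoop (query_terms : List String) : List (List (String × String)) → Bool
  | [] => false
  | chunk :: rest =>
    let text := PySem.Str.lower (PySem.Dict.getD ⟨chunk⟩ "text" "")
    if query_terms.any (fun term => PySem.Str.isIn term text) then true
    else pvALoop query_terms rest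

def detect_exact_match_py (query : String) (chunks : List (List (String × String))) : Bool :=
  let query_terms := (PySem.Str.split₀ (PySem.Str.lower query)).filter (fun term => decide (2 < PySem.Str.len term))
  if query_terms.isEmpty then false
  else pvALoop query_terms chunks

-- ===== PORT B =====
-- B: group the terms by length into sets (by_len.setdefault(len(t), set()).add(t)), then scan each
-- lowered text position by position, testing the fixed-length window slice for set membership.
def pvBuild (terms : List String) : PySem.Dict Int (PySem.Set String) :=
  terms.foldl (fun d t => PySem.Dict.insert d (PySem.Str.len t) (PySem.Set.add (PySem.Dict.getD d (PySem.Str.len t) []) t)) PySem.Dict.empty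

def pvBLoop (byLen : PySem.Dict Int (PySem.Set String)) : List (List (String × String)) → Bool
  | [] => false
  | chunk :: rest =>
    let text := PySem.Str.lower (PySem.Dict.getD ⟨chunk⟩ "text" "")
    if (PySem.List.pyRange 0 (PySem.Str.len text) 1).any (fun i =>
         byLen.items.any (fun p => (p.2).contains (PySem.Str.slice text (some i) (some (i + p.1))))) then true
    else pvBLoop byLen rest

def detect_exact_match_py_alt (query : String) (chunks : List (List (String × String))) : Bool :=
  let query_terms := (PySem.Str.split₀ (PySem.Str.lower query)).filter (fun term => decide (2 < PySem.Str.len term))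
  if query_terms.isEmpty then false
  else pvBLoop (pvBuild query_terms) chunks

-- ===== PRECONDITION & SPEC =====
def Spec_detect_exact_match_py (query : String) (chunks : List (List (String × String))) (out : Bool) : Prop := out = detect_exact_match_py_alt query chunks
instance (query : String) (chunks : List (List (String × String))) (out : Bool) : Decidable (Spec_detect_exact_match_py query chunks out) := by unfold Spec_detect_exact_match_py; infer_instance

-- ===== CLAIM (what is proved, stated in full; the proofs are below) =====
def Claim_equal_detect_exact_match_py : Prop := ∀ (query : String) (chunks : List (List (String × String))), Dom_detect_exact_match_py query chunks → Spec_detect_exact_match_py query chunks (detect_exact_match_py query chunks)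

-- ===== LEMMAS AND PROOFS =====

-- membership in a getD-looked-up set, for a dict with nodup keys
theorem pv_mem_getD_iff (d : PySem.Dict Int (PySem.Set String)) (hnd : d.keys.Nodup)
    (k : Int) (x : String) :
    x ∈ PySem.Dict.getD d k [] ↔ ∃ s, (k, s) ∈ d.items ∧ x ∈ s := by
  rw [PySem.Dict.getD_eq_get?_getD]
  constructor
  · intro hx
    cases hg : PySem.Dict.get? d k with
    | none => rw [hg] at hx; simp at hx
    | some s =>
      rw [hg] at hx
      exact ⟨s, PySem.Dict.mem_items_of_get?_eq_some d hg, hx⟩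
  · rintro ⟨s, hs, hx⟩
    rw [PySem.Dict.get?_of_mem_items d hs hnd]
    exact hx

-- the grouping fold: keys stay nodup, every stored string has the key as its length,
-- and the stored strings are exactly the old ones plus the folded terms
theorem pv_build_spec (ts : List String) (d : PySem.Dict Int (PySem.Set String))
    (hnd : d.keys.Nodup)
    (hlen : ∀ p ∈ d.items, ∀ x ∈ p.2, PySem.Str.len x = p.1) :
    (ts.foldl (fun d t => PySem.Dict.insert d (PySem.Str.len t) (PySem.Set.add (PySem.Dict.getD d (PySem.Str.len t) []) t)) d).keys.Nodup ∧
    (∀ p ∈ (ts.foldl (fun d t => PySem.Dict.insert d (PySem.Str.len t) (PySem.Set.add (PySem.Dict.getD d (PySem.Str.len t) []) t)) d).items, ∀ x ∈ p.2, PySem.Str.len x = p.1) ∧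
    (∀ x, (∃ p ∈ (ts.foldl (fun d t => PySem.Dict.insert d (PySem.Str.len t) (PySem.Set.add (PySem.Dict.getD d (PySem.Str.len t) []) t)) d).items, x ∈ p.2) ↔ (∃ p ∈ d.items, x ∈ p.2) ∨ x ∈ ts) := by
  induction ts generalizing d with
  | nil => exact ⟨hnd, hlen, fun x => by simp⟩
  | cons t ts ih =>
    simp only [List.foldl_cons]
    have hnd' : (PySem.Dict.insert d (PySem.Str.len t) (PySem.Set.add (PySem.Dict.getD d (PySem.Str.len t) []) t)).keys.Nodup :=
      PySem.Dict.nodup_keys_insert d _ _ hnd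
    have hlen' : ∀ p ∈ (PySem.Dict.insert d (PySem.Str.len t) (PySem.Set.add (PySem.Dict.getD d (PySem.Str.len t) []) t)).items, ∀ x ∈ p.2, PySem.Str.len x = p.1 := by
      intro p hp x hx
      rcases (PySem.Dict.mem_items_insert d _ _ p).mp hp with h | ⟨hp', _⟩
      · subst h
        rcases (PySem.Set.mem_add _ _ _).mp hx with hx' | hx'
        · rcases (pv_mem_getD_iff d hnd _ x).mp hx' with ⟨s, hs, hxs⟩
          exact hlen _ hs x hxs
        · subst hx'; rfl
      · exact hlen _ hp' x hx
    obtain ⟨h1, h2, h3⟩ := ih _ hnd' hlen'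
    refine ⟨h1, h2, fun x => ?_⟩
    rw [h3 x]
    have hins : (∃ p ∈ (PySem.Dict.insert d (PySem.Str.len t) (PySem.Set.add (PySem.Dict.getD d (PySem.Str.len t) []) t)).items, x ∈ p.2) ↔ (∃ p ∈ d.items, x ∈ p.2) ∨ x = t := by
      constructor
      · rintro ⟨p, hp, hx⟩
        rcases (PySem.Dict.mem_items_insert d _ _ p).mp hp with h | ⟨hp', _⟩
        · subst h
          rcases (PySem.Set.mem_add _ _ _).mp hx with hx' | hx'
          · rcases (pv_mem_getD_iff d hnd _ x).mp hx' with ⟨s, hs, hxs⟩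
            exact Or.inl ⟨(PySem.Str.len t, s), hs, hxs⟩
          · exact Or.inr hx'
        · exact Or.inl ⟨p, hp', hx⟩
      · rintro (⟨p, hp, hx⟩ | hx)
        · by_cases hk : p.1 = PySem.Str.len t
          · refine ⟨(PySem.Str.len t, PySem.Set.add (PySem.Dict.getD d (PySem.Str.len t) []) t), ?_, ?_⟩
            · exact (PySem.Dict.mem_items_insert d _ _ _).mpr (Or.inl rfl)
            · exact (PySem.Set.mem_add _ _ _).mpr (Or.inl ((pv_mem_getD_iff d hnd _ x).mpr ⟨p.2, by rw [← hk]; exact hp, hx⟩))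
          · exact ⟨p, (PySem.Dict.mem_items_insert d _ _ p).mpr (Or.inr ⟨hp, hk⟩), hx⟩
        · subst hx
          exact ⟨(PySem.Str.len x, PySem.Set.add (PySem.Dict.getD d (PySem.Str.len x) []) x), (PySem.Dict.mem_items_insert d _ _ _).mpr (Or.inl rfl), (PySem.Set.mem_add _ _ _).mpr (Or.inr rfl)⟩
    rw [hins]
    simp [or_assoc]

-- per-text: the position/window scan over the length-grouped sets equals the per-term substring test
theorem pv_text_eq (terms : List String) (hterms : ∀ t ∈ terms, 2 < PySem.Str.len t) (text : String) :
    ((PySem.List.pyRange 0 (PySem.Str.len text) 1).any (fun i =>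
       (pvBuild terms).items.any (fun p => (p.2).contains (PySem.Str.slice text (some i) (some (i + p.1))))))
    = terms.any (fun t => PySem.Str.isIn t text) := by
  obtain ⟨hnd, hlen, hmem⟩ := pv_build_spec terms PySem.Dict.empty PySem.Dict.nodup_keys_empty (by rintro ⟨a, b⟩ h; simp [PySem.Dict.empty] at h)
  rw [Bool.eq_iff_iff]
  simp only [List.any_eq_true, PySem.List.mem_pyRange_one]
  constructor
  · rintro ⟨i, ⟨hi0, hilt⟩, p, hp, hv⟩
    rw [PySem.Set.contains_iff] at hv
    generalize hvdef : PySem.Str.slice text (some i) (some (i + p.1)) = v at hv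
    rcases (hmem v).mp ⟨p, hp, hv⟩ with ⟨q, hq, _⟩ | hvt
    · simp [PySem.Dict.empty] at hq
    · have hlv : PySem.Str.len v = p.1 := hlen p hp v hv
      obtain ⟨k, hk⟩ : ∃ k : Nat, i = (k : Int) := ⟨i.toNat, (Int.toNat_of_nonneg hi0).symm⟩
      have hn : p.1 = (v.toList.length : Int) := by rw [← hlv, PySem.Str.len_eq]
      have hsl : (PySem.Str.slice text (some i) (some (i + p.1))).toList
          = (text.toList.drop k).take v.toList.length := by
        rw [hk, hn, PySem.Str.toList_slice, PySem.Chars.slice_eq_listSlice,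
          PySem.List.slice_natCast_add]
      rw [hvdef] at hsl
      have hpre : v.toList <+: text.toList.drop k := List.prefix_iff_eq_take.mpr hsl
      refine ⟨v, hvt, ?_⟩
      rw [PySem.Str.isIn_eq]
      exact (PySem.Chars.exists_prefix_drop_iff_isIn _ _).mp ⟨k, hpre⟩
  · rintro ⟨t, ht, hin⟩
    rw [PySem.Str.isIn_eq] at hin
    obtain ⟨j, hj⟩ := (PySem.Chars.exists_prefix_drop_iff_isIn _ _).mpr hin
    have htne : t.toList ≠ [] := by
      have h2 := hterms t ht
      rw [PySem.Str.len_eq] at h2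
      intro h; rw [h] at h2; simp at h2
    have hjlt : j < text.toList.length := by
      by_contra hge
      rw [List.drop_eq_nil_of_le (by omega)] at hj
      exact htne (List.prefix_nil.mp hj)
    obtain ⟨p2, hp2, htp2⟩ : ∃ s, (PySem.Str.len t, s) ∈ (pvBuild terms).items ∧ t ∈ s := by
      obtain ⟨p, hp, htp⟩ := (hmem t).mpr (Or.inr ht)
      have := hlen p hp t htp
      exact ⟨p.2, by rw [this]; simpa using hp, htp⟩
    refine ⟨(j : Int), ⟨by positivity, by rw [PySem.Str.len_eq]; exact_mod_cast hjlt⟩,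
      (PySem.Str.len t, p2), hp2, ?_⟩
    -- the window at j equals t
    have hslice : (PySem.Str.slice text (some (j : Int)) (some ((j : Int) + PySem.Str.len t))).toList = t.toList := by
      rw [PySem.Str.toList_slice, PySem.Chars.slice_eq_listSlice, PySem.Str.len_eq,
        PySem.List.slice_natCast_add]
      exact (List.prefix_iff_eq_take.mp hj).symm
    have : PySem.Str.slice text (some (j : Int)) (some ((j : Int) + PySem.Str.len t)) = t :=
      String.toList_inj.mp hslice
    rw [PySem.Set.contains_iff, this]; exact htp2

-- A's early-return loop is 'any' over the chunks
theorem pvALoop_eq_any (terms : List String) (chunks : List (List (String × String))) :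
    pvALoop terms chunks = chunks.any (fun chunk =>
      terms.any (fun term => PySem.Str.isIn term (PySem.Str.lower (PySem.Dict.getD ⟨chunk⟩ "text" "")))) := by
  induction chunks with
  | nil => rfl
  | cons c rest ih =>
    simp only [pvALoop, List.any_cons]
    split_ifs with h
    · rw [h, Bool.true_or]
    · rw [ih, Bool.not_eq_true] at *
      rw [h, Bool.false_or]

-- B's early-return loop is 'any' over the chunks
theorem pvBLoop_eq_any (byLen : PySem.Dict Int (PySem.Set String)) (chunks : List (List (String × String))) :
    pvBLoop byLen chunks = chunks.any (fun chunk =>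
      (PySem.List.pyRange 0 (PySem.Str.len (PySem.Str.lower (PySem.Dict.getD ⟨chunk⟩ "text" ""))) 1).any (fun i =>
        byLen.items.any (fun p => (p.2).contains (PySem.Str.slice (PySem.Str.lower (PySem.Dict.getD ⟨chunk⟩ "text" "")) (some i) (some (i + p.1)))))) := by
  induction chunks with
  | nil => rfl
  | cons c rest ih =>
    simp only [pvBLoop, List.any_cons]
    split_ifs with h
    · rw [h, Bool.true_or]
    · rw [ih, Bool.not_eq_true] at *
      rw [h, Bool.false_or]

-- ===== VERDICT (by name: the statement is the Claim_ definition above) =====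
theorem detect_exact_match_py_spec : Claim_equal_detect_exact_match_py := by
  intro query chunks _
  unfold Spec_detect_exact_match_py detect_exact_match_py detect_exact_match_py_alt
  set terms := (PySem.Str.split₀ (PySem.Str.lower query)).filter (fun term => decide (2 < PySem.Str.len term)) with hterms_def
  have hterms : ∀ t ∈ terms, 2 < PySem.Str.len t := by
    intro t ht
    rw [hterms_def, List.mem_filter] at ht
    simpa using ht.2
  simp only []
  split_ifs with h
  · rfl
  · rw [pvALoop_eq_any, pvBLoop_eq_any]
    simp only [pv_text_eq terms hterms]
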